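-- pv_equiv track=rewrite | github.com/Sriramjha/common-dashboard | sb-ahc-automator-main/modules/pdf_report.py | split_into_columns_with_bullets
-- ===== SOURCE A (Python) =====
-- def split_into_columns_with_bullets(items: list, num_cols: int = 2) -> list:
--     """Split a list into columns for table display with bullet points and bold text."""
--     if not items:
--         return []
--
--     # Calculate rows needed
--     rows_needed = (len(items) + num_cols - 1) // num_cols
--
--     # Create column data
--     columns = []
--     for i in range(num_cols):
--         start = i * rows_needed
--         end = start + rows_needed
--         columns.append(items[start:end])
--
--     # Pad shorter columns
--     max_len = max(len(col) for col in columns) if columns else 0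
--     for col in columns:
--         while len(col) < max_len:
--             col.append('')
--
--     # Transpose to rows with bullets
--     rows = []
--     for i in range(max_len):
--         row = []
--         for j in range(num_cols):
--             item = columns[j][i] if i < len(columns[j]) else ''
--             if item:
--                 row.append(f"• <b>{item}</b>")
--             else:
--                 row.append('')
--         rows.append(row)
--
--     return rows
-- ===== SOURCE B (Python) =====
-- def split_into_columns_with_bullets(items: list, num_cols: int = 2) -> list:
--     """Split a list into columns for table display with bullet points and bold text."""
--     if not items or num_cols <= 0:
--         return []
--     rows_needed = (len(items) + num_cols - 1) // num_cols
--     rows = []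
--     for i in range(rows_needed):
--         row = []
--         for j in range(num_cols):
--             idx = j * rows_needed + i
--             item = items[idx] if idx < len(items) else ''
--             row.append(f"• <b>{item}</b>" if item else '')
--         rows.append(row)
--     return rows
-- ===== Notes on version B (the rewrite author's own statement) =====
-- stated objective: simpler
-- what changed: B replaces A's three phases (build column slices, pad them with a while loop, transpose with guarded indexing) by one direct pass that computes each cell from the index formula idx = j*rows_needed + i; B also returns an empty result for non-positive num_cols instead of raising ZeroDivisionError at num_cols zero.
import Mathlib
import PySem

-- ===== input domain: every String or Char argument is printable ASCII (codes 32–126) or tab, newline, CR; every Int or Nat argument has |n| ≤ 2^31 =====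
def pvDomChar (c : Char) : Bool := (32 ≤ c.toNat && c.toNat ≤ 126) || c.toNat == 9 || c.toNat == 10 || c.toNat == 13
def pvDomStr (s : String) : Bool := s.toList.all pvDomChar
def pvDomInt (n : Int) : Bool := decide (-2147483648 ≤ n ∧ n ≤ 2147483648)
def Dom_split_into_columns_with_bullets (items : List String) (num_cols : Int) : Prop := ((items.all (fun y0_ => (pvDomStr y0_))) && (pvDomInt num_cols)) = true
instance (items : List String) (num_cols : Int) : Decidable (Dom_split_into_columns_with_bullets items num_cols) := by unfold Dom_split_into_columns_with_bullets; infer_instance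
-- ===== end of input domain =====

-- B builds each cell directly from the index formula idx = j*rows_needed + i, replacing A's
-- slice/pad/transpose phases (objective: simpler); B returns an empty result where A raises on num_cols = 0.

-- ===== PORT A =====
-- f"• <b>{item}</b>"
def pvBullet (item : String) : String := "• <b>" ++ item ++ "</b>"

-- 'while len(col) < max_len: col.append('')'
def pvWhilePad (maxLen : Nat) (col : List String) : List String :=
  if col.length < maxLen then pvWhilePad maxLen (col ++ [""]) else col
termination_by maxLen - col.length
decreasing_by simp [List.length_append]; omega

-- 'for i in range(num_cols): columns.append(items[start:end])'
def pvColumns (items : List String) (num_cols rows_needed : Int) : List (List String) :=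
  (PySem.List.pyRange 0 num_cols 1).map (fun i =>
    PySem.List.slice items (some (i * rows_needed)) (some (i * rows_needed + rows_needed)))

-- 'max(len(col) for col in columns) if columns else 0'
def pvMaxLen (columns : List (List String)) : Nat :=
  if columns ≠ [] then (columns.map List.length).foldl Nat.max 0 else 0

def split_into_columns_with_bullets (items : List String) (num_cols : Int) : List (List String) :=
  if items = [] then []
  else
    let rows_needed : Int := PySem.Int.floordiv ((items.length : Int) + num_cols - 1) num_cols
    let columns : List (List String) := pvColumns items num_cols rows_needed
    let max_len : Nat := pvMaxLen columns
    -- pad shorter columns (in-place append loop)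
    let padded : List (List String) := columns.map (fun col => pvWhilePad max_len col)
    -- transpose with bullets
    (PySem.List.pyRange 0 (max_len : Int) 1).map (fun i =>
      (PySem.List.pyRange 0 num_cols 1).map (fun j =>
        let col := PySem.List.pyGetD padded j []
        let item := if i < (col.length : Int) then PySem.List.pyGetD col i "" else ""
        if item ≠ "" then pvBullet item else ""))

-- ===== PORT B =====
def split_into_columns_with_bullets_alt (items : List String) (num_cols : Int) : List (List String) :=
  if items = [] ∨ num_cols ≤ 0 then []
  else
    let rows_needed : Int := PySem.Int.floordiv ((items.length : Int) + num_cols - 1) num_cols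
    (PySem.List.pyRange 0 rows_needed 1).map (fun i =>
      (PySem.List.pyRange 0 num_cols 1).map (fun j =>
        let idx := j * rows_needed + i
        let item := if idx < (items.length : Int) then PySem.List.pyGetD items idx "" else ""
        if item ≠ "" then pvBullet item else ""))

-- ===== PRECONDITION & SPEC =====
-- Pre_ excludes only the inputs where A raises ZeroDivisionError: non-empty items with num_cols = 0.
def Pre_split_into_columns_with_bullets (items : List String) (num_cols : Int) : Prop :=
  num_cols ≠ 0 ∨ items = []
instance (items : List String) (num_cols : Int) : Decidable (Pre_split_into_columns_with_bullets items num_cols) := by unfold Pre_split_into_columns_with_bullets; infer_instance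

def pvWitness_split_into_columns_with_bullets : List String × Int := (["a", "", "b"], 2)

def Spec_split_into_columns_with_bullets (items : List String) (num_cols : Int) (out : List (List String)) : Prop := out = split_into_columns_with_bullets_alt items num_cols
instance (items : List String) (num_cols : Int) (out : List (List String)) : Decidable (Spec_split_into_columns_with_bullets items num_cols out) := by unfold Spec_split_into_columns_with_bullets; infer_instance

-- ===== CLAIM (what is proved, stated in full; the proofs are below) =====
def Claim_equal_split_into_columns_with_bullets : Prop := ∀ (items : List String) (num_cols : Int), Dom_split_into_columns_with_bullets items num_cols → Pre_split_into_columns_with_bullets items num_cols → Spec_split_into_columns_with_bullets items num_cols (split_into_columns_with_bullets items num_cols)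


-- ===== LEMMAS AND PROOFS =====


theorem pvWhilePad_eq (maxLen : Nat) (col : List String) :
    pvWhilePad maxLen col = col ++ List.replicate (maxLen - col.length) "" := by
  fun_induction pvWhilePad maxLen col with
  | case1 col h ih =>
    rw [ih]
    rw [show maxLen - col.length = (maxLen - (col.length + 1)) + 1 by omega]
    simp [List.replicate_succ, List.append_assoc]
  | case2 col h =>
    rw [show maxLen - col.length = 0 by omega]
    simp

theorem pad_get (xs : List String) (s rn k : Nat) (hk : k < rn) :
    ((xs.drop s).take rn ++ List.replicate (rn - ((xs.drop s).take rn).length) "").getD k "" =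
    if s + k < xs.length then xs.getD (s + k) "" else "" := by
  simp only [List.getD_eq_getElem?_getD, List.getElem?_append, List.length_take, List.length_drop,
    List.getElem?_take, List.getElem?_drop, List.getElem?_replicate]
  split_ifs with h1 h2 h3 <;> simp_all <;> omega

theorem foldl_max_head (m : Nat) (l : List Nat) (h : ∀ x ∈ l, x ≤ m) : l.foldl Nat.max m = m := by
  induction l with
  | nil => rfl
  | cons a t ih =>
    simp only [List.foldl_cons]
    rw [show m.max a = m from Nat.max_eq_left (h a (by simp))]
    exact ih (fun x hx => h x (by simp [hx]))

-- ===== VERDICT (by name: the statement is the Claim_ definition above) =====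
theorem split_into_columns_with_bullets_spec : Claim_equal_split_into_columns_with_bullets := by
  intro items num_cols _ hpre
  unfold Spec_split_into_columns_with_bullets
  by_cases hnil : items = []
  · simp [split_into_columns_with_bullets, split_into_columns_with_bullets_alt, hnil]
  · have hc0 : num_cols ≠ 0 := by
      rcases hpre with h | h
      · exact h
      · exact absurd h hnil
    rcases lt_or_gt_of_ne hc0 with hneg | hpos
    · simp [split_into_columns_with_bullets, split_into_columns_with_bullets_alt,
        pvColumns, pvMaxLen, hnil,
        PySem.List.pyRange_one_eq_nil (by omega : num_cols ≤ (0:Int)), hneg.le]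
    · -- 0 < num_cols
      have hn : 0 < items.length := List.length_pos_iff.mpr hnil
      have hn1 : 1 ≤ ((items.length : Int)) := by exact_mod_cast hn
      set r : Int := PySem.Int.floordiv ((items.length : Int) + num_cols - 1) num_cols with hrdef
      have h1r : 1 ≤ r := by
        rw [hrdef, PySem.Int.le_floordiv_iff_mul_le hpos]
        linarith
      have hrn : r ≤ (items.length : Int) := by
        have hnc : (items.length : Int) ≤ (items.length : Int) * num_cols :=
          le_mul_of_one_le_right (by linarith) (by linarith)
        have h2 : r < (items.length : Int) + 1 := by
          rw [hrdef, PySem.Int.floordiv_lt_iff_lt_mul hpos]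
          nlinarith
        linarith
      have hcr : (items.length : Int) ≤ num_cols * r := by
        have h1 := PySem.Int.floordiv_mul_add_mod ((items.length : Int) + num_cols - 1) num_cols
        have h2 := PySem.Int.mod_lt ((items.length : Int) + num_cols - 1) hpos
        rw [← hrdef] at h1
        nlinarith
      have hr0 : 0 ≤ r := by linarith
      set rn : Nat := r.toNat with hrndef
      have hrn' : ((rn : Nat) : Int) = r := Int.toNat_of_nonneg hr0
      have hrnn : rn ≤ items.length := by omega
      have hrn1 : 1 ≤ rn := by omega
      have hcol : ∀ j : Int, 0 ≤ j →
          PySem.List.slice items (some (j * r)) (some (j * r + r)) =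
          (items.drop (j * r).toNat).take rn := by
        intro j hj
        have hjr : 0 ≤ j * r := mul_nonneg hj hr0
        have e1 : j * r = (((j * r).toNat : Nat) : Int) := (Int.toNat_of_nonneg hjr).symm
        calc PySem.List.slice items (some (j * r)) (some (j * r + r))
            = PySem.List.slice items (some (((j * r).toNat : Nat) : Int))
                (some ((((j * r).toNat : Nat) : Int) + ((rn : Nat) : Int))) := by rw [← e1, hrn']
          _ = (items.drop (j * r).toNat).take rn := PySem.List.slice_natCast_add items _ rn
      have hml : pvMaxLen (pvColumns items num_cols r) = rn := by
        unfold pvMaxLen pvColumns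
        rw [PySem.List.pyRange_one_cons hpos]
        rw [if_pos (by simp)]
        simp only [List.map_cons, List.foldl_cons, Nat.zero_max]
        rw [hcol 0 le_rfl]
        have h0' : ((items.drop ((0 : Int) * r).toNat).take rn).length = rn := by
          simp only [Int.zero_mul, Int.toNat_zero, List.drop_zero, List.length_take]
          omega
        rw [h0']
        apply foldl_max_head
        intro x hx
        simp only [List.map_map, List.mem_map, Function.comp] at hx
        obtain ⟨j, hj, rfl⟩ := hx
        have hj0 : 0 ≤ j := by
          have := (PySem.List.mem_pyRange_one.mp hj).1
          linarith
        rw [hcol j hj0]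
        simp only [List.length_take]
        omega
      simp only [split_into_columns_with_bullets, split_into_columns_with_bullets_alt,
        if_neg hnil, if_neg (show ¬(items = [] ∨ num_cols ≤ 0) by push Not; exact ⟨hnil, hpos⟩)]
      rw [← hrdef, hml, hrn']
      apply List.map_congr_left
      intro i hi
      obtain ⟨hi0, hir⟩ := PySem.List.mem_pyRange_one.mp hi
      apply List.map_congr_left
      intro j hj
      obtain ⟨hj0, hjc⟩ := PySem.List.mem_pyRange_one.mp hj
      -- compute the padded column A reads
      have hpad : PySem.List.pyGetD ((pvColumns items num_cols r).map (fun col => pvWhilePad rn col)) j [] =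
          (items.drop (j * r).toNat).take rn ++
            List.replicate (rn - ((items.drop (j * r).toNat).take rn).length) "" := by
        unfold pvColumns
        rw [List.map_map]
        rw [PySem.List.pyGetD_map_pyRange_of_nonneg _ num_cols j [] hj0 hjc]
        simp only [Function.comp]
        rw [hcol j hj0, pvWhilePad_eq]
      rw [hpad]
      have hclen : ((items.drop (j * r).toNat).take rn ++
          List.replicate (rn - ((items.drop (j * r).toNat).take rn).length) "").length = rn := by
        simp only [List.length_append, List.length_replicate, List.length_take]
        omega
      have hguardA : i < ((((items.drop (j * r).toNat).take rn ++
          List.replicate (rn - ((items.drop (j * r).toNat).take rn).length) "").length : Nat) : Int) := by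
        rw [hclen, hrn']
        exact hir
      have hieq : i = ((i.toNat : Nat) : Int) := (Int.toNat_of_nonneg hi0).symm
      have hidxe : j * r + i = (((j * r).toNat + i.toNat : Nat) : Int) := by
        push_cast
        rw [Int.toNat_of_nonneg (mul_nonneg hj0 hr0), Int.toNat_of_nonneg hi0]
      have hitem : (if i < ((((items.drop (j * r).toNat).take rn ++
            List.replicate (rn - ((items.drop (j * r).toNat).take rn).length) "").length : Nat) : Int)
            then PySem.List.pyGetD ((items.drop (j * r).toNat).take rn ++
              List.replicate (rn - ((items.drop (j * r).toNat).take rn).length) "") i ""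
            else "")
          = (if j * r + i < ((items.length : Nat) : Int)
            then PySem.List.pyGetD items (j * r + i) "" else "") := by
        rw [if_pos hguardA, hidxe, PySem.List.pyGetD_natCast items]
        conv_lhs => rw [hieq]
        rw [PySem.List.pyGetD_natCast]
        rw [pad_get items (j * r).toNat rn i.toNat (by omega)]
        by_cases hg : (j * r).toNat + i.toNat < items.length
        · rw [if_pos hg, if_pos (by exact_mod_cast hg)]
        · rw [if_neg hg, if_neg (by exact_mod_cast hg)]
      rw [hitem]
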